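-- pv_equiv track=rewrite | github.com/valen1013/MINIPROYECTO-I-E | miniproyecto2/ec.py | Otoria
-- ===== SOURCE A (Python) =====
-- def Otoria(lista_forms):
--     form = ''
--     inicial = True
--     for f in lista_forms:
--         if inicial:
--             form = f
--             inicial = False
--         else:
--             form = '(' + form + '∨' + f + ')'
--     return form
-- ===== SOURCE B (Python) =====
-- def Otoria(lista_forms):
--     if not lista_forms:
--         return ''
--     n = len(lista_forms)
--     return '(' * (n - 1) + lista_forms[0] + ''.join('\u2228' + f + ')' for f in lista_forms[1:])
-- ===== Notes on version B (the rewrite author's own statement) =====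
-- stated objective: faster
-- what changed: Instead of repeatedly wrapping a growing accumulator string in parentheses (rebuilding the whole string each step), B computes the nesting depth up front and emits the result flat: a prefix of n-1 '(' characters, the first formula, then one joined pass of '∨f)' fragments.
import Mathlib
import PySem

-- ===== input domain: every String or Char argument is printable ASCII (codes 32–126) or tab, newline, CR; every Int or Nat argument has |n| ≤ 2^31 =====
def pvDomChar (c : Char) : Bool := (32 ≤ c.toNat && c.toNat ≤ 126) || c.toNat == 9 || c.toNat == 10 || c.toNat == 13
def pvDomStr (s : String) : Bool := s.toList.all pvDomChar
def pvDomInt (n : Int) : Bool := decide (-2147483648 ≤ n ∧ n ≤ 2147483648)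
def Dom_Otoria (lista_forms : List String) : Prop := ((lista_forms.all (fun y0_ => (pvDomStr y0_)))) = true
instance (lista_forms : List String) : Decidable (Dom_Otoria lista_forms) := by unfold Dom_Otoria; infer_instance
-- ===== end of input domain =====

-- B builds the result flat (paren prefix + joined fragments) instead of A's repeated wrapping; objective: alternative decomposition.

-- ===== PORT A =====
-- state (form, inicial), one step per f, branches in A's order
def Otoria (lista_forms : List String) : String :=
  (lista_forms.foldl
    (fun (s : String × Bool) f =>
      if s.2 then (f, false)
      else ("(" ++ s.1 ++ "∨" ++ f ++ ")", s.2))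
    ("", true)).1

-- ===== PORT B =====
def Otoria_alt (lista_forms : List String) : String :=
  match lista_forms with
  | [] => ""
  | f0 :: rest =>
    String.ofList (List.replicate rest.length '(') ++ f0
      ++ String.join (rest.map (fun f => "∨" ++ f ++ ")"))

-- ===== PRECONDITION & SPEC =====
def Spec_Otoria (lista_forms : List String) (out : String) : Prop := out = Otoria_alt lista_forms
instance (lista_forms : List String) (out : String) : Decidable (Spec_Otoria lista_forms out) := by unfold Spec_Otoria; infer_instance

-- ===== CLAIM (what is proved, stated in full; the proofs are below) =====
def Claim_equal_Otoria : Prop := ∀ (lista_forms : List String), Dom_Otoria lista_forms → Spec_Otoria lista_forms (Otoria lista_forms)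

-- ===== LEMMAS AND PROOFS =====
theorem repl_paren_shift (n : Nat) (t : List Char) :
    List.replicate n '(' ++ '(' :: t = '(' :: (List.replicate n '(' ++ t) := by
  induction n with
  | zero => rfl
  | succ m ih => simp [List.replicate_succ, ih]

theorem otoria_loop (rest : List String) (acc : String) :
    (rest.foldl
      (fun (s : String × Bool) f =>
        if s.2 then (f, false)
        else ("(" ++ s.1 ++ "∨" ++ f ++ ")", s.2))
      (acc, false)).1
    = String.ofList (List.replicate rest.length '(') ++ acc
        ++ String.join (rest.map (fun f => "∨" ++ f ++ ")")) := by
  induction rest generalizing acc with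
  | nil => apply String.ext; simp
  | cons f rs ih =>
    simp only [List.foldl_cons, if_neg (by simp : ¬ (false = true))]
    rw [ih]
    apply String.ext
    simp [List.replicate_succ, repl_paren_shift]

-- ===== VERDICT (by name: the statement is the Claim_ definition above) =====
theorem Otoria_spec : Claim_equal_Otoria := by
  intro l _
  unfold Spec_Otoria Otoria Otoria_alt
  cases l with
  | nil => rfl
  | cons f0 rest =>
    simp only [List.foldl_cons, reduceIte]
    exact otoria_loop rest f0
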